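-- pv_equiv track=rewrite | github.com/primalfunk/2dtextadventure | game_logic.py | favor_square_cluster
-- ===== SOURCE A (Python) =====
-- def favor_square_cluster(current_pos, visited_positions):
--     dx_min = min(pos[0] for pos in visited_positions)
--     dx_max = max(pos[0] for pos in visited_positions)
--     dy_min = min(pos[1] for pos in visited_positions)
--     dy_max = max(pos[1] for pos in visited_positions)
--
--     width = dx_max - dx_min
--     height = dy_max - dy_min
--
--     if width > height:
--         favored_directions = ["north", "south"]
--     else:
--         favored_directions = ["east", "west"]
--
--     return favored_directions
-- ===== SOURCE B (Python) =====
-- def favor_square_cluster(current_pos, visited_positions):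
--     xs = sorted(p[0] for p in visited_positions)
--     ys = sorted(p[1] for p in visited_positions)
--     if xs[-1] - xs[0] > ys[-1] - ys[0]:
--         return ["north", "south"]
--     return ["east", "west"]
-- ===== Notes on version B (the rewrite author's own statement) =====
-- stated objective: alternative
-- what changed: Computes the cluster's extents by sorting each coordinate list once and reading its endpoints, instead of four separate min/max reductions; Pre_ excludes the empty list, on which both versions raise.
import Mathlib
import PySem

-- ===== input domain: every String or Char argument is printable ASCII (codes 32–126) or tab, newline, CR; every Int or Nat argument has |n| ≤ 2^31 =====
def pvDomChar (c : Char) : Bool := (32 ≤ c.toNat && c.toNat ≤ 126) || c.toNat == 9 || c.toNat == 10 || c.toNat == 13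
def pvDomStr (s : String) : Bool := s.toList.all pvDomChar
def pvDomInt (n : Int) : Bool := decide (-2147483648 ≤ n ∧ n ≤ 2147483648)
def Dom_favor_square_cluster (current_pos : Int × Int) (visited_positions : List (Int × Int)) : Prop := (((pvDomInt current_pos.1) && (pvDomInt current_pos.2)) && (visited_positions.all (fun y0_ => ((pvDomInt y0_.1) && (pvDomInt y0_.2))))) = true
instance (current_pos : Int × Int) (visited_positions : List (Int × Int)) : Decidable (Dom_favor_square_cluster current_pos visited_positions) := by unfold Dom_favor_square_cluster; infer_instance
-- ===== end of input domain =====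

-- B computes the bounding-box extents by sorting each coordinate list once and reading its
-- endpoints, instead of A's four separate min/max reductions (objective: alternative algorithm).

-- ===== PORT A =====
def favor_square_cluster (current_pos : Int × Int) (visited_positions : List (Int × Int)) : List String :=
  let dx_min := (PySem.List.min? (visited_positions.map (fun pos => pos.1)) (fun x => x)).getD 0
  let dx_max := (PySem.List.max? (visited_positions.map (fun pos => pos.1)) (fun x => x)).getD 0
  let dy_min := (PySem.List.min? (visited_positions.map (fun pos => pos.2)) (fun x => x)).getD 0
  let dy_max := (PySem.List.max? (visited_positions.map (fun pos => pos.2)) (fun x => x)).getD 0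
  let width := dx_max - dx_min
  let height := dy_max - dy_min
  if width > height then ["north", "south"] else ["east", "west"]

-- ===== PORT B =====
def favor_square_cluster_alt (current_pos : Int × Int) (visited_positions : List (Int × Int)) : List String :=
  let xs := PySem.List.sorted (visited_positions.map (fun p => p.1)) (fun x : Int => x) false
  let ys := PySem.List.sorted (visited_positions.map (fun p => p.2)) (fun x : Int => x) false
  -- xs[-1], xs[0]: pyGetD with default 0, total under Pre_ (nonempty list; the Python raises IndexError on [])
  if PySem.List.pyGetD xs ((-1 : Int)) 0 - PySem.List.pyGetD xs 0 0 >
     PySem.List.pyGetD ys ((-1 : Int)) 0 - PySem.List.pyGetD ys 0 0 then ["north", "south"]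
  else ["east", "west"]

-- ===== PRECONDITION & SPEC =====
-- Pre_ excludes only the empty list, on which Python A raises ValueError (and B raises IndexError).
def Pre_favor_square_cluster (current_pos : Int × Int) (visited_positions : List (Int × Int)) : Prop := visited_positions ≠ []
instance (current_pos : Int × Int) (visited_positions : List (Int × Int)) : Decidable (Pre_favor_square_cluster current_pos visited_positions) := by unfold Pre_favor_square_cluster; infer_instance
def pvWitness_favor_square_cluster : (Int × Int) × (List (Int × Int)) := ((0, 0), [(1, 2), (3, 0)])
def Spec_favor_square_cluster (current_pos : Int × Int) (visited_positions : List (Int × Int)) (out : List String) : Prop := out = favor_square_cluster_alt current_pos visited_positions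
instance (current_pos : Int × Int) (visited_positions : List (Int × Int)) (out : List String) : Decidable (Spec_favor_square_cluster current_pos visited_positions out) := by unfold Spec_favor_square_cluster; infer_instance

-- ===== CLAIM (what is proved, stated in full; the proofs are below) =====
def Claim_equal_favor_square_cluster : Prop := ∀ (current_pos : Int × Int) (visited_positions : List (Int × Int)), Dom_favor_square_cluster current_pos visited_positions → Pre_favor_square_cluster current_pos visited_positions → Spec_favor_square_cluster current_pos visited_positions (favor_square_cluster current_pos visited_positions)

-- ===== LEMMAS AND PROOFS =====
lemma le_getLast_of_pairwise {l : List Int} (hp : l.Pairwise (fun a b => a ≤ b)) (h : l ≠ []) :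
    ∀ y ∈ l, y ≤ l.getLast h := by
  induction l with
  | nil => simp at h
  | cons a t ih =>
    intro y hy
    cases t with
    | nil => simp at hy; simp [hy, List.getLast]
    | cons b u =>
      rw [List.getLast_cons (by simp)]
      rcases List.mem_cons.mp hy with rfl | hy'
      · exact (List.pairwise_cons.mp hp).1 _ (List.getLast_mem (by simp))
      · exact ih (List.pairwise_cons.mp hp).2 (by simp) y hy'

-- the first element of sorted(l) is min(l), the last is max(l)
lemma sorted_head_min (l : List Int) (h : l ≠ []) :
    PySem.List.pyGetD (PySem.List.sorted l (fun x => x) false) 0 0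
      = (PySem.List.min? l (fun x => x)).getD 0 := by
  obtain ⟨m, hm⟩ : ∃ m, PySem.List.min? l (fun x => x) = some m := by
    cases hmin : PySem.List.min? l (fun x => x) with
    | none => exact absurd ((PySem.List.min?_eq_none_iff l (fun x => x)).mp hmin) h
    | some m => exact ⟨m, rfl⟩
  have hs : PySem.List.sorted l (fun x => x) false ≠ [] := by
    simp [PySem.List.sorted_eq_nil_iff, h]
  obtain ⟨a, t, hat⟩ := List.exists_cons_of_ne_nil hs
  have hale : ∀ y ∈ l, a ≤ y := PySem.List.key_head_sorted_le l (fun x => x) hat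
  have hmem : a ∈ l := by
    have : a ∈ PySem.List.sorted l (fun x => x) false := by simp [hat]
    exact (PySem.List.mem_sorted l (fun x => x) false a).mp this
  have h1 : m ≤ a := PySem.List.min?_isMin hm a hmem
  have h2 : a ≤ m := hale m (PySem.List.min?_mem hm)
  rw [hat, hm]
  simp [PySem.List.pyGetD_zero_cons]; omega

lemma sorted_last_max (l : List Int) (h : l ≠ []) :
    PySem.List.pyGetD (PySem.List.sorted l (fun x => x) false) (-1) 0
      = (PySem.List.max? l (fun x => x)).getD 0 := by
  obtain ⟨m, hm⟩ : ∃ m, PySem.List.max? l (fun x => x) = some m := by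
    cases hmax : PySem.List.max? l (fun x => x) with
    | none => exact absurd ((PySem.List.max?_eq_none_iff l (fun x => x)).mp hmax) h
    | some m => exact ⟨m, rfl⟩
  have hs : PySem.List.sorted l (fun x => x) false ≠ [] := by
    simp [PySem.List.sorted_eq_nil_iff, h]
  rw [PySem.List.pyGetD_neg_one _ _ hs, hm]
  have hp : (PySem.List.sorted l (fun x => x) false).Pairwise (fun a b => a ≤ b) :=
    PySem.List.sorted_pairwise l (fun x => x)
  have hglmem : (PySem.List.sorted l (fun x => x) false).getLast hs ∈ l :=
    (PySem.List.mem_sorted l (fun x => x) false _).mp (List.getLast_mem hs)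
  have h1 : (PySem.List.sorted l (fun x => x) false).getLast hs ≤ m :=
    PySem.List.max?_isMax hm _ hglmem
  have h2 : m ≤ (PySem.List.sorted l (fun x => x) false).getLast hs :=
    le_getLast_of_pairwise hp hs m ((PySem.List.mem_sorted l (fun x => x) false m).mpr (PySem.List.max?_mem hm))
  simp; omega

-- ===== VERDICT (by name: the statement is the Claim_ definition above) =====
theorem favor_square_cluster_spec : Claim_equal_favor_square_cluster := by
  unfold Claim_equal_favor_square_cluster
  intro cp vp _ hpre
  unfold Spec_favor_square_cluster favor_square_cluster favor_square_cluster_alt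
  have hx : vp.map (fun p : Int × Int => p.1) ≠ [] := by simpa using hpre
  have hy : vp.map (fun p : Int × Int => p.2) ≠ [] := by simpa using hpre
  simp only [sorted_head_min _ hx, sorted_head_min _ hy,
    sorted_last_max _ hx, sorted_last_max _ hy]
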